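-- pv_equiv track=rewrite | github.com/F5Networks/f5-common-python | devtools/bin/kick-dhclient.py | toScanCode
-- ===== SOURCE A (Python) =====
-- SCAN_CODES = {
--     '1': '02', '2': '03', '3': '04', '4': '05', '5': '06', '6': '07', '7': '08',
--     '8': '09', '9': '0A', '0': '0B', '-': '0C', '=': '0D', '<bs>': '0E',
--     '<tab>': '0F', 'q': '10', 'w': '11', 'e': '12', 'r': '13', 't': '14',
--     'y': '15', 'u': '16', 'i': '17', 'o': '18', 'p': '19', '[': '1A',
--     ']': '1B', '<enter>': '1C', '<ctrl>': '1D', 'a': '1E', 's': '1F',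
--     'd': '20', 'f': '21', 'g': '22', 'h': '23', 'j': '24', 'k': '25',
--     'l': '26', ';': '27', '<shift>': '2A', 'z': '2C', 'x': '2D', 'c': '2E',
--     'v': '2F', 'b': '30', 'n': '31', 'm': '32', ',': '33', '.': '34', '/': '35',
--     ' ': '39'
-- }
--
-- def getBreakCode(key):
--     if key not in SCAN_CODES:
--         raise Exception('Undefined key: ' + key)
--     makeCode = SCAN_CODES[key]
--     a = int(makeCode, 16)
--     b = int('80', 16)
--     c = a + b
--     d = format(c, 'x')
--     return d
--
-- def toScanCode(s):
--     result = []
--     tmp = ''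
--     special = False
--
--     for c in s:
--         if c == '<':
--             tmp = tmp + c
--             special = True
--             continue
--         elif c == '>':
--             tmp = tmp + c
--             special = False
--             c = tmp
--             tmp = ''
--         elif special:
--             tmp = tmp + c
--             continue
--
--         if c == c.upper() and not c.isdigit() and c is not ' ':
--             stopCodeShift = getBreakCode('<shift>')
--             stopCodeInput = getBreakCode(c)
--             result.append([
--                 SCAN_CODES['<shift>'],
--                 SCAN_CODES[c],
--                 stopCodeInput,
--                 stopCodeShift
--             ])
--         else:
--             stopCode = getBreakCode(c)
--             result.append([
--                 SCAN_CODES[c],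
--                 stopCode
--             ])
--     return result
-- ===== SOURCE B (Python) =====
-- # Table-driven rewrite: all make/break codes are precomputed in one literal table,
-- # so the per-character state machine, hex arithmetic and shift predicate disappear.
-- KEY_CODES = {
--     '1': ['02', '82'],
--     '2': ['03', '83'],
--     '3': ['04', '84'],
--     '4': ['05', '85'],
--     '5': ['06', '86'],
--     '6': ['07', '87'],
--     '7': ['08', '88'],
--     '8': ['09', '89'],
--     '9': ['0A', '8a'],
--     '0': ['0B', '8b'],
--     '-': ['2A', '0C', '8c', 'aa'],
--     '=': ['2A', '0D', '8d', 'aa'],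
--     '<bs>': ['0E', '8e'],
--     '<tab>': ['0F', '8f'],
--     'q': ['10', '90'],
--     'w': ['11', '91'],
--     'e': ['12', '92'],
--     'r': ['13', '93'],
--     't': ['14', '94'],
--     'y': ['15', '95'],
--     'u': ['16', '96'],
--     'i': ['17', '97'],
--     'o': ['18', '98'],
--     'p': ['19', '99'],
--     '[': ['2A', '1A', '9a', 'aa'],
--     ']': ['2A', '1B', '9b', 'aa'],
--     '<enter>': ['1C', '9c'],
--     '<ctrl>': ['1D', '9d'],
--     'a': ['1E', '9e'],
--     's': ['1F', '9f'],
--     'd': ['20', 'a0'],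
--     'f': ['21', 'a1'],
--     'g': ['22', 'a2'],
--     'h': ['23', 'a3'],
--     'j': ['24', 'a4'],
--     'k': ['25', 'a5'],
--     'l': ['26', 'a6'],
--     ';': ['2A', '27', 'a7', 'aa'],
--     '<shift>': ['2A', 'aa'],
--     'z': ['2C', 'ac'],
--     'x': ['2D', 'ad'],
--     'c': ['2E', 'ae'],
--     'v': ['2F', 'af'],
--     'b': ['30', 'b0'],
--     'n': ['31', 'b1'],
--     'm': ['32', 'b2'],
--     ',': ['2A', '33', 'b3', 'aa'],
--     '.': ['2A', '34', 'b4', 'aa'],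
--     '/': ['2A', '35', 'b5', 'aa'],
--     ' ': ['39', 'b9'],
-- }
--
--
-- def toScanCode(s):
--     out = []
--     while s:
--         if s[0] == '<':
--             j = s.find('>')
--             if j < 0:
--                 break
--             key, s = s[:j + 1], s[j + 1:]
--         else:
--             key, s = s[0], s[1:]
--         out.append(KEY_CODES[key])
--     return out
-- ===== Notes on version B (the rewrite author's own statement) =====
-- stated objective: alternative
-- what changed: Replaces A's single-pass character state machine with per-key hex arithmetic and a shift predicate by a precomputed literal key->codes table plus a plain loop that cuts one key (a char or a '<...>' group found via s.find('>')) off the front of the string per iteration.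
-- outside the precondition, e.g. on toScanCode('>'): A raises Exception, B raises KeyError; on toScanCode('<...>'): A raises Exception, B raises KeyError
import Mathlib
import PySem

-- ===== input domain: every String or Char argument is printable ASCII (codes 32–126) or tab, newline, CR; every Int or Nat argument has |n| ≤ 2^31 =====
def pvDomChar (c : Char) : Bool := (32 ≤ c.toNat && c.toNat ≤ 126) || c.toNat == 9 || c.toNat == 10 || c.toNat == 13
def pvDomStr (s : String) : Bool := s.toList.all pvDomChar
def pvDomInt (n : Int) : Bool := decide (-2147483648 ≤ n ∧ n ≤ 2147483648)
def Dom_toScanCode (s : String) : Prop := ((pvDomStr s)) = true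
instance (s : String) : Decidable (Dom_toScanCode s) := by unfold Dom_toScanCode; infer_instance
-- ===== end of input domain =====

-- B replaces A's per-character state machine (hex arithmetic + shift predicate at each key)
-- by one precomputed literal key→codes table and a plain cut-off-a-token loop; equal return
-- values are proved on every input where A returns (Pre_).

-- ===== PORT A =====
-- A's module context: SCAN_CODES and getBreakCode
def SCAN_CODES : PySem.Dict String String := PySem.Dict.ofList [
  ("1", "02"), ("2", "03"), ("3", "04"), ("4", "05"), ("5", "06"), ("6", "07"), ("7", "08"),
  ("8", "09"), ("9", "0A"), ("0", "0B"), ("-", "0C"), ("=", "0D"), ("<bs>", "0E"),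
  ("<tab>", "0F"), ("q", "10"), ("w", "11"), ("e", "12"), ("r", "13"), ("t", "14"),
  ("y", "15"), ("u", "16"), ("i", "17"), ("o", "18"), ("p", "19"), ("[", "1A"),
  ("]", "1B"), ("<enter>", "1C"), ("<ctrl>", "1D"), ("a", "1E"), ("s", "1F"),
  ("d", "20"), ("f", "21"), ("g", "22"), ("h", "23"), ("j", "24"), ("k", "25"),
  ("l", "26"), (";", "27"), ("<shift>", "2A"), ("z", "2C"), ("x", "2D"), ("c", "2E"),
  ("v", "2F"), ("b", "30"), ("n", "31"), ("m", "32"), (",", "33"), (".", "34"), ("/", "35"),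
  (" ", "39")]

-- int(s, 16) for the uppercase-hex literals stored in SCAN_CODES (hand port, exact on them)
def pvHexVal (c : Char) : Nat :=
  if '0' ≤ c ∧ c ≤ '9' then c.toNat - 48
  else if 'a' ≤ c ∧ c ≤ 'f' then c.toNat - 87
  else if 'A' ≤ c ∧ c ≤ 'F' then c.toNat - 55
  else 0

def pvParseHex (s : String) : Nat := s.toList.foldl (fun a c => 16 * a + pvHexVal c) 0

-- format(n, 'x'): lowercase hex, no padding (Nat.toDigits 16 is exactly that)
def pvFormatHex (n : Nat) : String := String.ofList (Nat.toDigits 16 n)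

-- getBreakCode; on a key missing from SCAN_CODES the Python raises -- excluded by Pre_,
-- here the lookup totalises with "" (value irrelevant under Pre_)
def getBreakCode (key : String) : String :=
  let makeCode := SCAN_CODES.getD key ""
  pvFormatHex (pvParseHex makeCode + 128)

-- the bottom half of A's loop body, emitting one key; Python A's `c is not ' '` is
-- identity on interned strings, equal to `c != ' '` on every string A actually tests
def pvKeyCodes (key : String) : List String :=
  if key = PySem.Str.upper key ∧ ¬ PySem.Str.strIsdigit key = true ∧ key ≠ " " then
    [SCAN_CODES.getD "<shift>" "", SCAN_CODES.getD key "",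
     getBreakCode key, getBreakCode "<shift>"]
  else
    [SCAN_CODES.getD key "", getBreakCode key]

-- A's for-loop over the characters with mutable (result, tmp, special)
def toScanCodeLoop (acc : List (List String)) (tmp : List Char) (special : Bool) :
    List Char → List (List String)
  | [] => acc
  | c :: rest =>
    if c = '<' then toScanCodeLoop acc (tmp ++ [c]) true rest          -- tmp += c; special = True; continue
    else if c = '>' then                                               -- tmp += c; special = False; c = tmp; tmp = ''
      toScanCodeLoop (acc ++ [pvKeyCodes (String.ofList (tmp ++ [c]))]) [] false rest
    else if special then toScanCodeLoop acc (tmp ++ [c]) special rest  -- tmp += c; continue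
    else toScanCodeLoop (acc ++ [pvKeyCodes (String.ofList [c])]) tmp special rest

def toScanCode (s : String) : List (List String) :=
  toScanCodeLoop [] [] false s.toList

-- ===== PORT B =====
-- B's module-level literal table: key -> the full emitted code list, precomputed
def KEY_CODES : PySem.Dict String (List String) := PySem.Dict.ofList [
  ("1", ["02", "82"]),
  ("2", ["03", "83"]),
  ("3", ["04", "84"]),
  ("4", ["05", "85"]),
  ("5", ["06", "86"]),
  ("6", ["07", "87"]),
  ("7", ["08", "88"]),
  ("8", ["09", "89"]),
  ("9", ["0A", "8a"]),
  ("0", ["0B", "8b"]),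
  ("-", ["2A", "0C", "8c", "aa"]),
  ("=", ["2A", "0D", "8d", "aa"]),
  ("<bs>", ["0E", "8e"]),
  ("<tab>", ["0F", "8f"]),
  ("q", ["10", "90"]),
  ("w", ["11", "91"]),
  ("e", ["12", "92"]),
  ("r", ["13", "93"]),
  ("t", ["14", "94"]),
  ("y", ["15", "95"]),
  ("u", ["16", "96"]),
  ("i", ["17", "97"]),
  ("o", ["18", "98"]),
  ("p", ["19", "99"]),
  ("[", ["2A", "1A", "9a", "aa"]),
  ("]", ["2A", "1B", "9b", "aa"]),
  ("<enter>", ["1C", "9c"]),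
  ("<ctrl>", ["1D", "9d"]),
  ("a", ["1E", "9e"]),
  ("s", ["1F", "9f"]),
  ("d", ["20", "a0"]),
  ("f", ["21", "a1"]),
  ("g", ["22", "a2"]),
  ("h", ["23", "a3"]),
  ("j", ["24", "a4"]),
  ("k", ["25", "a5"]),
  ("l", ["26", "a6"]),
  (";", ["2A", "27", "a7", "aa"]),
  ("<shift>", ["2A", "aa"]),
  ("z", ["2C", "ac"]),
  ("x", ["2D", "ad"]),
  ("c", ["2E", "ae"]),
  ("v", ["2F", "af"]),
  ("b", ["30", "b0"]),
  ("n", ["31", "b1"]),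
  ("m", ["32", "b2"]),
  (",", ["2A", "33", "b3", "aa"]),
  (".", ["2A", "34", "b4", "aa"]),
  ("/", ["2A", "35", "b5", "aa"]),
  (" ", ["39", "b9"])]

-- Source B's while loop: cut one key off the front of s per iteration (s.find('>') < 0 on the
-- remaining string = no '>' left, then break); a key missing from KEY_CODES raises KeyError
-- in Python -- excluded by Pre_, totalised here with [].  fuel = |s| decreases each step.
def toScanCodeAltLoop : Nat → List Char → List (List String) → List (List String)
  | 0, _, out => out
  | _, [], out => out
  | fuel + 1, c :: rest, out =>
    if c = '<' then
      match (c :: rest).dropWhile (· != '>') with                      -- j = s.find('>')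
      | [] => out                                                      -- if j < 0: break
      | d :: s' =>                                                     -- key, s = s[:j+1], s[j+1:]
        toScanCodeAltLoop fuel s'
          (out ++ [KEY_CODES.getD (String.ofList ((c :: rest).takeWhile (· != '>') ++ [d])) []])
    else
      toScanCodeAltLoop fuel rest (out ++ [KEY_CODES.getD (String.ofList [c]) []])

def toScanCode_alt (s : String) : List (List String) :=
  toScanCodeAltLoop s.toList.length s.toList []

-- ===== PRECONDITION & SPEC =====
-- spec-only tokenizer used by Pre_ and the proofs (not part of either port):
-- structural recursion on the remaining characters, one key per step
def pvTokGo : Nat → List Char → List String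
  | 0, _ => []
  | _, [] => []
  | fuel + 1, c :: rest =>
    if c = '<' then
      match rest.dropWhile (· != '>') with
      | [] => []
      | d :: rest' => String.ofList (c :: rest.takeWhile (· != '>') ++ [d]) :: pvTokGo fuel rest'
    else
      String.ofList [c] :: pvTokGo fuel rest

-- fuel = length of the remaining characters, always sufficient (pvTokGo_irrel below)
def pvTok (cs : List Char) : List String := pvTokGo cs.length cs

-- Pre_: every emitted key is one of the defined scan-code keys -- exactly the inputs on
-- which Python A returns (on any other key getBreakCode raises 'Undefined key', and B's
-- table lookup raises KeyError)
def pvScanKeys : List String :=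
  ["1", "2", "3", "4", "5", "6", "7", "8", "9", "0", "-", "=", "<bs>",
   "<tab>", "q", "w", "e", "r", "t", "y", "u", "i", "o", "p", "[",
   "]", "<enter>", "<ctrl>", "a", "s", "d", "f", "g", "h", "j", "k",
   "l", ";", "<shift>", "z", "x", "c", "v", "b", "n", "m", ",", ".", "/",
   " "]

def Pre_toScanCode (s : String) : Prop :=
  ∀ k ∈ pvTok s.toList, k ∈ pvScanKeys
instance (s : String) : Decidable (Pre_toScanCode s) := by unfold Pre_toScanCode; infer_instance

def pvWitness_toScanCode : String := "a;"

def Spec_toScanCode (s : String) (out : List (List String)) : Prop := out = toScanCode_alt s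
instance (s : String) (out : List (List String)) : Decidable (Spec_toScanCode s out) := by
  unfold Spec_toScanCode; infer_instance

-- ===== CLAIM (what is proved, stated in full; the proofs are below) =====
def Claim_equal_toScanCode : Prop :=
  ∀ (s : String), Dom_toScanCode s → Pre_toScanCode s → Spec_toScanCode s (toScanCode s)

-- ===== LEMMAS AND PROOFS =====

theorem pvTokGo_irrel : ∀ (fuel : Nat) (cs : List Char), cs.length ≤ fuel →
    pvTokGo fuel cs = pvTokGo cs.length cs := by
  intro fuel
  induction fuel using Nat.strong_induction_on with
  | _ fuel ih =>
    intro cs hcs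
    match fuel, cs with
    | 0, [] => rfl
    | _ + 1, [] => rfl
    | fuel + 1, c :: rest =>
      have hlr : rest.length ≤ fuel := by simpa using Nat.le_of_succ_le_succ hcs
      simp only [List.length_cons, pvTokGo]
      by_cases h1 : c = '<'
      · simp only [h1]
        cases hq : rest.dropWhile (· != '>') with
        | nil => simp
        | cons d rest' =>
          have hle : rest'.length ≤ rest.length := by
            have h2 := List.length_dropWhile_le (· != '>') rest
            rw [hq] at h2; simp at h2; omega
          simp only [hq]
          rw [ih fuel (Nat.lt_succ_self _) rest' (le_trans hle hlr),
              ih rest.length (Nat.lt_succ_of_le hlr) rest' hle]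
          simp
      · simp only [if_neg h1]
        rw [ih fuel (Nat.lt_succ_self _) rest hlr]

theorem pvTok_cons (c : Char) (rest : List Char) :
    pvTok (c :: rest) =
      if c = '<' then
        match rest.dropWhile (· != '>') with
        | [] => []
        | d :: rest' => String.ofList (c :: rest.takeWhile (· != '>') ++ [d]) :: pvTok rest'
      else String.ofList [c] :: pvTok rest := by
  rw [pvTok, List.length_cons, pvTokGo]
  by_cases h1 : c = '<'
  · simp only [h1]
    cases hq : rest.dropWhile (· != '>') with
    | nil => rfl
    | cons d rest' =>
      have hle : rest'.length ≤ rest.length := by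
        have h2 := List.length_dropWhile_le (· != '>') rest
        rw [hq] at h2; simp at h2; omega
      simp only [hq]
      rw [pvTokGo_irrel rest.length rest' hle]
      rfl
  · simp only [if_neg h1]
    rfl

-- the tokens a pending '<...' group (accumulated tmp, special = True) still produces from cs
def pvGroupTok (tmp : List Char) (cs : List Char) : List String :=
  match cs.dropWhile (· != '>') with
  | [] => []
  | d :: rest' => String.ofList (tmp ++ cs.takeWhile (· != '>') ++ [d]) :: pvTok rest'

theorem pvTok_lt (rest : List Char) :
    pvTok ('<' :: rest) = pvGroupTok ['<'] rest := by
  rw [pvTok_cons, pvGroupTok]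
  cases hq : List.dropWhile (· != '>') rest <;> simp_all

-- A's state machine from a reachable state produces pvKeyCodes mapped over the tokens
theorem pvLoopA_eq : ∀ n (cs : List Char), cs.length ≤ n →
    (∀ acc, toScanCodeLoop acc [] false cs = acc ++ (pvTok cs).map pvKeyCodes)
    ∧ (∀ tmp acc, toScanCodeLoop acc tmp true cs = acc ++ (pvGroupTok tmp cs).map pvKeyCodes) := by
  intro n
  induction n with
  | zero =>
    intro cs hcs
    have : cs = [] := by cases cs <;> simp_all
    subst this
    constructor
    · intro acc; simp [toScanCodeLoop, pvTok, pvTokGo]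
    · intro tmp acc; simp [toScanCodeLoop, pvGroupTok]
  | succ n ih =>
    intro cs hcs
    cases cs with
    | nil =>
      constructor
      · intro acc; simp [toScanCodeLoop, pvTok, pvTokGo]
      · intro tmp acc; simp [toScanCodeLoop, pvGroupTok]
    | cons c rest =>
      have hr : rest.length ≤ n := by simpa using Nat.le_of_succ_le_succ hcs
      constructor
      · intro acc
        by_cases h1 : c = '<'
        · subst h1
          rw [toScanCodeLoop, if_pos rfl, (ih rest hr).2, pvTok_lt]
          simp
        · by_cases h2 : c = '>'
          · subst h2
            rw [toScanCodeLoop, if_neg h1, if_pos rfl, (ih rest hr).1, pvTok_cons]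
            simp [h1, List.append_assoc]
          · rw [toScanCodeLoop, if_neg h1, if_neg h2, if_neg (Bool.false_ne_true), (ih rest hr).1,
                pvTok_cons]
            simp [h1, List.append_assoc]
      · intro tmp acc
        by_cases h2 : c = '>'
        · subst h2
          have h1 : ('>' : Char) ≠ '<' := by decide
          rw [toScanCodeLoop, if_neg h1, if_pos rfl, (ih rest hr).1, pvGroupTok]
          simp [List.append_assoc]
        · by_cases h1 : c = '<'
          · subst h1
            rw [toScanCodeLoop, if_pos rfl, (ih rest hr).2]
            have hp : ((· != '>') '<') = true := by decide
            rw [pvGroupTok, pvGroupTok, List.dropWhile_cons, List.takeWhile_cons]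
            simp [hp, List.append_assoc]
          · rw [toScanCodeLoop, if_neg h1, if_neg h2, if_pos rfl, (ih rest hr).2]
            have hp : ((· != '>') c) = true := by simp [h2]
            rw [pvGroupTok, pvGroupTok, List.dropWhile_cons, List.takeWhile_cons]
            simp [hp, List.append_assoc]

-- B's loop produces the table lookup mapped over the same tokens
theorem pvLoopB_eq : ∀ (fuel : Nat) (cs : List Char), cs.length ≤ fuel → ∀ out,
    toScanCodeAltLoop fuel cs out
      = out ++ (pvTok cs).map (fun k => KEY_CODES.getD k []) := by
  intro fuel
  induction fuel with
  | zero =>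
    intro cs hcs out
    have : cs = [] := by cases cs <;> simp_all
    subst this
    simp [toScanCodeAltLoop, pvTok, pvTokGo]
  | succ n ih =>
    intro cs hcs out
    cases cs with
    | nil => simp [toScanCodeAltLoop, pvTok, pvTokGo]
    | cons c rest =>
      have hr : rest.length ≤ n := by simpa using Nat.le_of_succ_le_succ hcs
      by_cases h1 : c = '<'
      · subst h1
        have hp : ((· != '>') '<') = true := by decide
        rw [toScanCodeAltLoop, if_pos rfl, pvTok_cons, if_pos rfl]
        simp only [List.dropWhile_cons, List.takeWhile_cons, hp, if_pos]
        cases hq : rest.dropWhile (· != '>') with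
        | nil => simp
        | cons d rest' =>
          have hle : rest'.length ≤ rest.length := by
            have h2 := List.length_dropWhile_le (· != '>') rest
            rw [hq] at h2; simp at h2; omega
          dsimp only
          rw [ih rest' (le_trans hle hr)]
          simp [List.append_assoc]
      · rw [toScanCodeAltLoop, if_neg h1, pvTok_cons, if_neg h1, ih rest hr]
        simp [List.append_assoc]

-- on every defined key the literal table equals A's computed emission
set_option maxRecDepth 8192 in
theorem pvTable_eq : ∀ k ∈ pvScanKeys, pvKeyCodes k = KEY_CODES.getD k [] := by
  decide

theorem pvPorts_eq (s : String) (hp : Pre_toScanCode s) :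
    toScanCode s = toScanCode_alt s := by
  rw [toScanCode, (pvLoopA_eq s.toList.length s.toList (Nat.le_refl _)).1 [],
      toScanCode_alt, pvLoopB_eq s.toList.length s.toList (Nat.le_refl _) []]
  simp only [List.nil_append]
  exact List.map_congr_left (fun k hk => pvTable_eq k (hp k hk))

-- ===== VERDICT (by name: the statement is the Claim_ definition above) =====
theorem toScanCode_spec : Claim_equal_toScanCode := by
  intro s _ hp
  unfold Spec_toScanCode
  exact pvPorts_eq s hp
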